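-- pv_equiv track=rewrite | github.com/Crystalyx/PycharmProjects | Python.hw/homestat_cp1251.py | extract_general
-- ===== SOURCE A (Python) =====
-- def extract_general(stat):
--     general_list = []
--     male = extract_general_male(stat)
--     female = extract_general_female(stat)
--     for man in male:
--         general_list.append(man)
--     for man in female:
--         general_list.append(man)
--
--     general = sorted(general_list, reverse=True, key=lambda kv: kv[1])
--     return general
--
-- def extract_general_male(stat):
--     general_dict = {}
--     for year in stat['M'].keys():
--         for man in stat['M'][year].keys():
--             if general_dict.__contains__(man):
--                 general_dict[man] = general_dict[man] + stat['M'][year][man]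
--             else:
--                 general_dict[man] = stat['M'][year][man]
--     general = sorted(general_dict.items(), reverse=True, key=lambda kv: kv[1])
--     return general
--
-- def extract_general_female(stat):
--     general_dict = {}
--     for year in stat['F'].keys():
--         for man in stat['F'][year].keys():
--             if general_dict.__contains__(man):
--                 general_dict[man] = general_dict[man] + stat['F'][year][man]
--             else:
--                 general_dict[man] = stat['F'][year][man]
--     general = sorted(general_dict.items(), reverse=True, key=lambda kv: kv[1])
--     return general
-- ===== SOURCE B (Python) =====
-- def extract_general(stat):
--     return merge_desc(gender_totals(stat['M']), gender_totals(stat['F']))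
--
--
-- def gender_totals(by_year):
--     pairs = [(man, n) for yd in by_year.values() for man, n in yd.items()]
--     counts = {}
--     for man, n in pairs:
--         counts[man] = counts.get(man, 0) + n
--     return sorted(counts.items(), key=lambda kv: kv[1], reverse=True)
--
--
-- def merge_desc(xs, ys):
--     out = []
--     i = j = 0
--     while i < len(xs) and j < len(ys):
--         if xs[i][1] >= ys[j][1]:
--             out.append(xs[i])
--             i += 1
--         else:
--             out.append(ys[j])
--             j += 1
--     out.extend(xs[i:])
--     out.extend(ys[j:])
--     return out
-- ===== Notes on version B (the rewrite author's own statement) =====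
-- stated objective: alternative
-- what changed: B replaces A's duplicated keys()+lookup aggregation helpers by one gender_totals that flattens values()/items() into a single Counter-style dict.get loop over (name,count) pairs, and replaces A's concatenate-and-resort of the two sorted per-gender lists by a linear two-pointer merge (ties take the male entry first, exactly the stable-sort order A produces).
import Mathlib
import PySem

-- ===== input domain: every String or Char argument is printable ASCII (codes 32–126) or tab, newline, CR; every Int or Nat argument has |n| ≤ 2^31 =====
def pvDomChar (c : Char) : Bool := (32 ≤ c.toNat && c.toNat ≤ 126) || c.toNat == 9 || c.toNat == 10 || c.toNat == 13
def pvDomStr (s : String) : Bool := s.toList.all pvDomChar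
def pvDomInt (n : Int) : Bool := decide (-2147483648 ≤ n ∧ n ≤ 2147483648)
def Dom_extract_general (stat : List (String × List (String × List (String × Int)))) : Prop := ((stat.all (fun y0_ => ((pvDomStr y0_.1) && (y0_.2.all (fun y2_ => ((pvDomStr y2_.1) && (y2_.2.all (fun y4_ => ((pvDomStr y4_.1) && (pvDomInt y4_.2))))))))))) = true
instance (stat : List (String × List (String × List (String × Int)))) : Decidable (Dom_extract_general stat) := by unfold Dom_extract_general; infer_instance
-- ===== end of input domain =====

-- B aggregates each gender by flattening all (name, count) pairs through values()/items() into one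
-- Counter-style loop and replaces A's concatenate-and-resort by a linear merge of the two sorted
-- lists (ties prefer male, the stable-sort order A produces); objective: alternative.

-- ===== PORT A =====
-- A dict is an assoc list: iteration over .keys() walks the distinct keys in first-occurrence
-- order (PySem.List.dedup), lookup is first match (List.lookup).
-- extract_general_male / extract_general_female have the identical body applied to stat['M'] /
-- stat['F']; this is that body.
def pvGender (g : List (String × List (String × Int))) : List (String × Int) :=
  let d := (PySem.List.dedup (g.map Prod.fst)).foldl (fun d year =>
      match List.lookup year g with
      | none => d  -- unreachable: year ∈ keys of g
      | some yd =>
        (PySem.List.dedup (yd.map Prod.fst)).foldl (fun d man =>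
           match List.lookup man yd with
           | none => d  -- unreachable: man ∈ keys of yd
           | some v =>
             match d.get? man with
             | some cur => d.insert man (cur + v)   -- general_dict.__contains__(man)
             | none => d.insert man v) d) PySem.Dict.empty
  PySem.List.sorted d.items (fun kv => kv.2) true

-- stat['M'] / stat['F']: first-match lookup; none = KeyError, excluded by Pre_
def pvMale (stat : List (String × List (String × List (String × Int)))) : List (String × Int) :=
  match List.lookup "M" stat with
  | some g => pvGender g
  | none => []

def pvFemale (stat : List (String × List (String × List (String × Int)))) : List (String × Int) :=
  match List.lookup "F" stat with
  | some g => pvGender g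
  | none => []

def extract_general (stat : List (String × List (String × List (String × Int)))) : List (String × Int) :=
  let male := pvMale stat
  let female := pvFemale stat
  let general_list := male.foldl (fun acc man => acc ++ [man]) []
  let general_list := female.foldl (fun acc man => acc ++ [man]) general_list
  PySem.List.sorted general_list (fun kv => kv.2) true

-- ===== PORT B =====
-- yd.items(): the (key, first-match value) pairs over the distinct keys
def altItems (yd : List (String × Int)) : List (String × Int) :=
  (PySem.List.dedup (yd.map Prod.fst)).filterMap
    (fun man => (List.lookup man yd).map (fun n => (man, n)))

-- by_year.values(): the first-match values over the distinct keys
def altValues (g : List (String × List (String × Int))) : List (List (String × Int)) :=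
  (PySem.List.dedup (g.map Prod.fst)).filterMap (fun year => List.lookup year g)

-- gender_totals of Source B: flatten to the pair list, one Counter-style loop, sort descending
def altTotals (g : List (String × List (String × Int))) : List (String × Int) :=
  let pairs := (altValues g).flatMap altItems
  let counts := pairs.foldl (fun d p => d.modify p.1 0 (· + p.2)) PySem.Dict.empty
  PySem.List.sorted counts.items (fun kv => kv.2) true

-- merge_desc of Source B: the two-pointer loop over indices is the obvious structural recursion
def pvMerge : List (String × Int) → List (String × Int) → List (String × Int)
  | [], ys => ys
  | xs, [] => xs
  | x :: xs, y :: ys =>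
    if y.2 ≤ x.2 then x :: pvMerge xs (y :: ys)   -- xs[i][1] >= ys[j][1]
    else y :: pvMerge (x :: xs) ys

def extract_general_alt (stat : List (String × List (String × List (String × Int)))) : List (String × Int) :=
  pvMerge (altTotals ((List.lookup "M" stat).getD []))
          (altTotals ((List.lookup "F" stat).getD []))

-- ===== PRECONDITION & SPEC =====
-- A raises KeyError (stat['M'] / stat['F']) when either key is absent; Pre_ excludes exactly those inputs.
def Pre_extract_general (stat : List (String × List (String × List (String × Int)))) : Prop :=
  "M" ∈ stat.map Prod.fst ∧ "F" ∈ stat.map Prod.fst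
instance (stat : List (String × List (String × List (String × Int)))) : Decidable (Pre_extract_general stat) := by unfold Pre_extract_general; infer_instance

def pvWitness_extract_general : (List (String × List (String × List (String × Int)))) :=
  [("M", [("2000", [("bob", 2)])]), ("F", [("2000", [("ann", 3)])])]

def Spec_extract_general (stat : List (String × List (String × List (String × Int)))) (out : List (String × Int)) : Prop := out = extract_general_alt stat
instance (stat : List (String × List (String × List (String × Int)))) (out : List (String × Int)) : Decidable (Spec_extract_general stat out) := by unfold Spec_extract_general; infer_instance

-- ===== CLAIM (what is proved, stated in full; the proofs are below) =====
def Claim_equal_extract_general : Prop := ∀ (stat : List (String × List (String × List (String × Int)))), Dom_extract_general stat → Pre_extract_general stat → Spec_extract_general stat (extract_general stat)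

-- ===== LEMMAS AND PROOFS =====

-- B's single Counter step equals A's __contains__ branch
theorem modify_eq_contains_branch (d : PySem.Dict String Int) (k : String) (v : Int) :
    d.modify k 0 (· + v)
      = match d.get? k with
        | some cur => d.insert k (cur + v)
        | none => d.insert k v := by
  cases h : d.get? k <;>
    simp [PySem.Dict.modify, PySem.Dict.getD_eq_get?_getD, h]

-- folding over a filterMap is folding with the none-case skipped
theorem foldl_filterMap {α β γ : Type} (l : List α) (f : α → Option β) (g : γ → β → γ) (init : γ) :
    (l.filterMap f).foldl g init
      = l.foldl (fun acc x => match f x with | none => acc | some b => g acc b) init := by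
  induction l generalizing init with
  | nil => rfl
  | cons x xs ih => cases h : f x <;> simp [h, ih]

-- folding over a flatMap is the nested fold
theorem foldl_flatMap {α β γ : Type} (l : List α) (g : α → List β) (f : γ → β → γ) (init : γ) :
    (l.flatMap g).foldl f init = l.foldl (fun acc x => (g x).foldl f acc) init := by
  induction l generalizing init with
  | nil => rfl
  | cons x xs ih => simp [List.flatMap_cons, List.foldl_append, ih]

-- B's flattened Counter loop builds exactly A's dict, so the per-gender results coincide
theorem altTotals_eq_pvGender (g : List (String × List (String × Int))) :
    altTotals g = pvGender g := by
  simp only [altTotals, pvGender, altValues]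
  rw [foldl_flatMap, foldl_filterMap]
  congr 2
  apply PySem.List.foldl_congr_mem
  intro d year _
  cases hy : List.lookup year g with
  | none => rfl
  | some yd =>
    simp only [altItems]
    rw [foldl_filterMap]
    apply PySem.List.foldl_congr_mem
    intro d man _
    cases hm : List.lookup man yd with
    | none => rfl
    | some v => simp only [Option.map_some]; exact modify_eq_contains_branch d man v

-- inserting x passes a prefix none of whose elements compare before x
theorem insertBy_prefix {α : Type} (before : α → α → Bool) (x : α) (p B : List α)
    (h : ∀ y ∈ p, before x y = false) :
    PySem.List.insertBy before x (p ++ B) = p ++ PySem.List.insertBy before x B := by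
  induction p with
  | nil => rfl
  | cons y ys ih =>
    simp only [List.cons_append, PySem.List.insertBy, h y (by simp)]
    simp [ih (fun z hz => h z (by simp [hz]))]

-- a whole fold of insertions passes such a prefix
theorem foldl_insertBy_prefix {α : Type} (before : α → α → Bool) (fs : List α) (p B : List α)
    (h : ∀ x ∈ fs, ∀ y ∈ p, before x y = false) :
    fs.foldl (fun acc x => PySem.List.insertBy before x acc) (p ++ B)
      = p ++ fs.foldl (fun acc x => PySem.List.insertBy before x acc) B := by
  induction fs generalizing B with
  | nil => rfl
  | cons f fs ih =>
    simp only [List.foldl_cons]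
    rw [insertBy_prefix before f p B (h f (by simp))]
    exact ih (PySem.List.insertBy before f B) (fun x hx y hy => h x (by simp [hx]) y hy)

-- insertBy as a takeWhile / dropWhile split
theorem insertBy_eq_take_drop (f : String × Int) (ml : List (String × Int)) :
    PySem.List.insertBy (fun a b => decide (b.2 < a.2)) f ml
      = ml.takeWhile (fun m => decide (f.2 ≤ m.2)) ++ f :: ml.dropWhile (fun m => decide (f.2 ≤ m.2)) := by
  induction ml with
  | nil => rfl
  | cons m ms ih =>
    by_cases hlt : m.2 < f.2
    · simp [PySem.List.insertBy, List.takeWhile, List.dropWhile, hlt, not_le.mpr hlt]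
    · simp [PySem.List.insertBy, List.takeWhile, List.dropWhile, hlt, not_lt.mp hlt, ih]

-- the merge takes exactly the takeWhile-prefix of the male list first
theorem pvMerge_cons (f : String × Int) (fs ml : List (String × Int)) :
    pvMerge ml (f :: fs)
      = ml.takeWhile (fun m => decide (f.2 ≤ m.2)) ++ f :: pvMerge (ml.dropWhile (fun m => decide (f.2 ≤ m.2))) fs := by
  induction ml with
  | nil => simp [pvMerge]
  | cons m ms ih =>
    by_cases hle : f.2 ≤ m.2
    · simp [pvMerge, List.takeWhile, List.dropWhile, hle, ih]
    · simp [pvMerge, List.takeWhile, List.dropWhile, hle]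

theorem pvMerge_nil (ml : List (String × Int)) : pvMerge ml [] = ml := by
  cases ml <;> simp [pvMerge]

-- the fold of insertions of the female list into the (descending) male list is the merge
theorem foldl_insert_eq_merge (fl : List (String × Int)) (ml : List (String × Int))
    (hf : fl.Pairwise (fun a b => b.2 ≤ a.2)) :
    fl.foldl (fun acc x => PySem.List.insertBy (fun a b => decide (b.2 < a.2)) x acc) ml
      = pvMerge ml fl := by
  induction fl generalizing ml with
  | nil => exact (pvMerge_nil ml).symm
  | cons f fs ih =>
    simp only [List.foldl_cons]
    rw [insertBy_eq_take_drop f ml]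
    have hsplit := foldl_insertBy_prefix (fun a b : String × Int => decide (b.2 < a.2)) fs
      (ml.takeWhile (fun m => decide (f.2 ≤ m.2)) ++ [f])
      (ml.dropWhile (fun m => decide (f.2 ≤ m.2)))
      (by
        intro x hx y hy
        have hxf : x.2 ≤ f.2 := (List.pairwise_cons.mp hf).1 x hx
        simp only [List.mem_append, List.mem_singleton] at hy
        rcases hy with hy | hy
        · have := List.mem_takeWhile_imp hy
          simp only [decide_eq_true_eq] at this
          simp; omega
        · subst hy; simp; omega)
    rw [List.append_cons, hsplit, pvMerge_cons]
    rw [ih ((List.pairwise_cons.mp hf).2) (ml := ml.dropWhile (fun m => decide (f.2 ≤ m.2)))]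
    simp

-- main lemma: the stable reverse sort of the concatenation of two descending lists is their merge
theorem sorted_append_eq_merge (ml fl : List (String × Int))
    (hm : ml.Pairwise (fun a b => b.2 ≤ a.2)) (hf : fl.Pairwise (fun a b => b.2 ≤ a.2)) :
    PySem.List.sorted (ml ++ fl) (fun kv => kv.2) true = pvMerge ml fl := by
  rw [PySem.List.sorted_rev_eq_foldl_insertBy, List.foldl_append]
  have h2 := (PySem.List.sorted_rev_eq_foldl_insertBy ml (fun kv : String × Int => kv.2)).symm.trans
    (PySem.List.sorted_rev_eq_self_of_pairwise ml (fun kv : String × Int => kv.2) hm)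
  rw [h2]
  exact foldl_insert_eq_merge fl ml hf

theorem pvGender_pairwise (g : List (String × List (String × Int))) :
    (pvGender g).Pairwise (fun a b => b.2 ≤ a.2) := by
  unfold pvGender
  exact PySem.List.sorted_pairwise_rev _ _

-- under Pre_ the lookups hit, so the keys exist and getD takes the found value
theorem lookup_isSome_of_mem {stat : List (String × List (String × List (String × Int)))}
    {k : String} (h : k ∈ stat.map Prod.fst) : ∃ g, List.lookup k stat = some g := by
  induction stat with
  | nil => simp at h
  | cons p rest ih =>
    by_cases hk : k = p.1
    · exact ⟨p.2, by simp [List.lookup, hk]⟩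
    · rcases ih (by simpa [hk] using h) with ⟨g, hg⟩
      have hb : (k == p.1) = false := beq_eq_false_iff_ne.mpr hk
      exact ⟨g, by simp [List.lookup, hb, hg]⟩

-- ===== VERDICT (by name: the statement is the Claim_ definition above) =====
theorem extract_general_spec : Claim_equal_extract_general := by
  intro stat _ hpre
  obtain ⟨gm, hm⟩ := lookup_isSome_of_mem hpre.1
  obtain ⟨gf, hf⟩ := lookup_isSome_of_mem hpre.2
  show extract_general stat = extract_general_alt stat
  unfold extract_general extract_general_alt pvMale pvFemale
  rw [hm, hf]
  simp only [Option.getD_some, altTotals_eq_pvGender,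
    PySem.List.foldl_append_singleton, List.nil_append]
  exact sorted_append_eq_merge _ _ (pvGender_pairwise gm) (pvGender_pairwise gf)
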